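-- pv_equiv track=rewrite | github.com/mottosen/AdventOfCode | python/AOC25/Day10/Parts/util/handlers.py | turn_off_lights
-- ===== SOURCE A (Python) =====
-- from itertools import combinations
--
-- def turn_off_lights(line):
--     init_bin, buttons = line
--     buttons_amount = len(buttons)
--
--     # greedily trying the least buttons at a time
--     for presses in range(buttons_amount):
--         # brute force combinations of current button press amount
--         for limited_buttons in combinations(buttons, presses):
--             bin = init_bin
--
--             # press one button at a time
--             for button in limited_buttons:
--                 bin ^= button
--
--             # turning a ligth series fully off is the same problem
--             if bin == 0:
--                 return presses
--
--     return buttons_amount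
-- ===== SOURCE B (Python) =====
-- def turn_off_lights(line):
--     init_bin, buttons = line
--
--     def best(bin, i):
--         # minimal size of a subset of buttons[i:] whose XOR cancels bin, or None
--         if i == len(buttons):
--             return 0 if bin == 0 else None
--         skip = best(bin, i + 1)
--         take = best(bin ^ buttons[i], i + 1)
--         if take is not None:
--             take += 1
--         if skip is None:
--             return take
--         if take is None:
--             return skip
--         return min(skip, take)
--
--     r = best(init_bin, 0)
--     return len(buttons) if r is None else r
-- ===== Notes on version B (the rewrite author's own statement) =====
-- stated objective: alternative
-- what changed: Replaced the by-size enumeration of itertools.combinations (re-XORing each combination from scratch, outer loop over sizes) with a take/skip recursion over the button list that computes the minimal cancelling subset size in one structural pass.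
import Mathlib
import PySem

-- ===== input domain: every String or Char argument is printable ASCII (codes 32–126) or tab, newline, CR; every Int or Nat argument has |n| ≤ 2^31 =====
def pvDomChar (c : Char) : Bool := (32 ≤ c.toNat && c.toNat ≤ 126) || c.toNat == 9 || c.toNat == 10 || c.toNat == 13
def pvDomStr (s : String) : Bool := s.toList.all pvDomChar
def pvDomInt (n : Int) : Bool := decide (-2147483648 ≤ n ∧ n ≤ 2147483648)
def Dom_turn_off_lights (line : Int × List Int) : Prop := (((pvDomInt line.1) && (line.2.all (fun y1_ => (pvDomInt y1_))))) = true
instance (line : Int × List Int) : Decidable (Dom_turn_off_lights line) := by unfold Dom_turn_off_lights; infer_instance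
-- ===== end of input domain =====

-- B replaces A's by-size enumeration of all button combinations with a take/skip
-- recursion over the button list computing the minimal cancelling subset size
-- directly (objective: alternative; same exponential cost, different algorithm).

-- ===== PORT A =====
-- A: for presses in range(len(buttons)): for c in combinations(buttons, presses):
--      if xor-fold of c over init_bin == 0: return presses;  fallthrough: len(buttons).
-- combinations(buttons, k) is ported as List.sublistsLen k buttons (same collection of
-- index-subsequences); the early-returning double loop is the first k whose combination
-- set contains a cancelling one, i.e. find? over List.range.
def turn_off_lights (line : Int × List Int) : Int :=
  let initBin := line.1
  let buttons := line.2
  let n := buttons.length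
  match (List.range n).find?
      (fun k => (List.sublistsLen k buttons).any
        (fun c => c.foldl (fun b x => PySem.Int.bxor b x) initBin == 0)) with
  | some k => (k : Int)
  | none => (n : Int)

-- ===== PORT B =====
-- best bin l = minimal length of a sublist of l whose XOR cancels bin, or none.
def pvBest (bin : Int) : List Int → Option Nat
  | [] => if bin = 0 then some 0 else none
  | b :: rest =>
    let skip := pvBest bin rest
    let take := (pvBest (PySem.Int.bxor bin b) rest).map (· + 1)
    match skip, take with
    | none, t => t
    | s, none => s
    | some s, some t => some (min s t)

def turn_off_lights_alt (line : Int × List Int) : Int :=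
  match pvBest line.1 line.2 with
  | some m => (m : Int)
  | none => (line.2.length : Int)

-- ===== PRECONDITION & SPEC =====
def Spec_turn_off_lights (line : Int × List Int) (out : Int) : Prop := out = turn_off_lights_alt line
instance (line : Int × List Int) (out : Int) : Decidable (Spec_turn_off_lights line out) := by unfold Spec_turn_off_lights; infer_instance

-- ===== CLAIM (what is proved, stated in full; the proofs are below) =====
def Claim_equal_turn_off_lights : Prop := ∀ (line : Int × List Int), Dom_turn_off_lights line → Spec_turn_off_lights line (turn_off_lights line)

-- ===== LEMMAS AND PROOFS =====

-- pvBest = none ↔ no sublist cancels bin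
theorem pvBest_none {bin : Int} {l : List Int} (h : pvBest bin l = none) :
    ∀ s : List Int, s.Sublist l → s.foldl (fun b x => PySem.Int.bxor b x) bin ≠ 0 := by
  induction l generalizing bin with
  | nil =>
    intro s hs
    rw [List.sublist_nil] at hs
    subst hs
    simp only [List.foldl]
    simp only [pvBest] at h
    split at h <;> simp_all
  | cons b rest ih =>
    intro s hs
    simp only [pvBest] at h
    rcases hskip : pvBest bin rest with _ | sk <;>
      rcases htake : pvBest (PySem.Int.bxor bin b) rest with _ | tk <;>
      simp [hskip, htake] at h
    rcases List.sublist_cons_iff.mp hs with h1 | ⟨r, rfl, hr⟩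
    · exact ih hskip s h1
    · simpa [List.foldl] using ih htake r hr

-- pvBest = some m → witness of length m
theorem pvBest_some_witness {bin : Int} {l : List Int} {m : Nat} (h : pvBest bin l = some m) :
    ∃ s : List Int, s.Sublist l ∧ s.length = m ∧ s.foldl (fun b x => PySem.Int.bxor b x) bin = 0 := by
  induction l generalizing bin m with
  | nil =>
    simp only [pvBest] at h
    split at h
    · cases h
      exact ⟨[], List.Sublist.refl _, rfl, by simpa⟩
    · cases h
  | cons b rest ih =>
    simp only [pvBest] at h
    rcases hskip : pvBest bin rest with _ | sk <;>
      rcases htake : pvBest (PySem.Int.bxor bin b) rest with _ | tk <;>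
      simp [hskip, htake] at h
    · obtain ⟨s, hs, hl, hx⟩ := ih htake
      exact ⟨b :: s, (hs.cons₂ b), by simp [hl, ← h], by simpa [List.foldl] using hx⟩
    · obtain ⟨s, hs, hl, hx⟩ := ih hskip
      exact ⟨s, hs.cons b, by omega, hx⟩
    · rcases Nat.le_total sk (tk + 1) with hle | hle
      · obtain ⟨s, hs, hl, hx⟩ := ih hskip
        exact ⟨s, hs.cons b, by omega, hx⟩
      · obtain ⟨s, hs, hl, hx⟩ := ih htake
        refine ⟨b :: s, (hs.cons₂ b), by simp only [List.length_cons]; omega, by simpa [List.foldl] using hx⟩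

-- pvBest = some m → m is a lower bound on cancelling sublist lengths
theorem pvBest_some_min {bin : Int} {l : List Int} {m : Nat} (h : pvBest bin l = some m) :
    ∀ s : List Int, s.Sublist l → s.foldl (fun b x => PySem.Int.bxor b x) bin = 0 → m ≤ s.length := by
  induction l generalizing bin m with
  | nil =>
    intro s hs
    rw [List.sublist_nil] at hs
    subst hs
    simp only [pvBest] at h
    split at h
    · cases h; simp
    · cases h
  | cons b rest ih =>
    intro s hs hx
    simp only [pvBest] at h
    rcases hskip : pvBest bin rest with _ | sk <;>
      rcases htake : pvBest (PySem.Int.bxor bin b) rest with _ | tk <;>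
      simp [hskip, htake] at h
    · rcases List.sublist_cons_iff.mp hs with h1 | ⟨r, rfl, hr⟩
      · exact absurd hx (pvBest_none hskip s h1)
      · have := ih htake r hr (by simpa [List.foldl] using hx)
        simp; omega
    · rcases List.sublist_cons_iff.mp hs with h1 | ⟨r, rfl, hr⟩
      · exact h ▸ ih hskip s h1 hx
      · exact absurd (by simpa [List.foldl] using hx) (pvBest_none htake r hr)
    · rcases List.sublist_cons_iff.mp hs with h1 | ⟨r, rfl, hr⟩
      · have := ih hskip s h1 hx
        omega
      · have := ih htake r hr (by simpa [List.foldl] using hx)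
        simp; omega

-- find? over a range returns the first index satisfying P
theorem find?_range'_first (P : Nat → Bool) (m : Nat) (hP : P m = true)
    (hmin : ∀ k, k < m → P k = false) :
    ∀ s n, s ≤ m → m < s + n → (List.range' s n).find? P = some m := by
  intro s n
  induction n generalizing s with
  | zero => omega
  | succ n ih =>
    intro hs hm
    rw [List.range'_succ, List.find?_cons]
    rcases Nat.eq_or_lt_of_le hs with rfl | hlt
    · simp [hP]
    · rw [hmin s hlt]
      exact ih (s + 1) hlt (by omega)

theorem find?_range_first (P : Nat → Bool) (n m : Nat) (hm : m < n) (hP : P m = true)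
    (hmin : ∀ k, k < m → P k = false) : (List.range n).find? P = some m := by
  rw [List.range_eq_range']
  exact find?_range'_first P m hP hmin 0 n (by omega) (by omega)

-- ===== VERDICT (by name: the statement is the Claim_ definition above) =====
theorem turn_off_lights_spec : Claim_equal_turn_off_lights := by
  intro line _
  obtain ⟨initBin, buttons⟩ := line
  unfold Spec_turn_off_lights turn_off_lights turn_off_lights_alt
  simp only
  set P : Nat → Bool := fun k => (List.sublistsLen k buttons).any
      (fun c => c.foldl (fun b x => PySem.Int.bxor b x) initBin == 0) with hP
  have Pchar : ∀ k, P k = true ↔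
      ∃ s : List Int, s.Sublist buttons ∧ s.length = k ∧ s.foldl (fun b x => PySem.Int.bxor b x) initBin = 0 := by
    intro k
    simp only [hP, List.any_eq_true, List.mem_sublistsLen, beq_iff_eq]
    constructor
    · rintro ⟨c, ⟨hc, hl⟩, hx⟩; exact ⟨c, hc, hl, hx⟩
    · rintro ⟨c, hc, hl, hx⟩; exact ⟨c, ⟨hc, hl⟩, hx⟩
  rcases hbest : pvBest initBin buttons with _ | m
  · -- no cancelling sublist: find? = none, both sides = length
    have : (List.range buttons.length).find? P = none := by
      rw [List.find?_eq_none]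
      intro k _
      simp only [Bool.not_eq_true]
      rcases h : P k with _ | _
      · rfl
      · obtain ⟨s, hs, _, hx⟩ := (Pchar k).mp h
        exact absurd hx (pvBest_none hbest s hs)
    simp [this]
  · -- minimal cancelling length m
    obtain ⟨s, hs, hl, hx⟩ := pvBest_some_witness hbest
    have hmn : m ≤ buttons.length := hl ▸ hs.length_le
    have hmin : ∀ k, k < m → P k = false := by
      intro k hk
      rcases h : P k with _ | _
      · rfl
      · obtain ⟨t, ht, htl, htx⟩ := (Pchar k).mp h
        have := pvBest_some_min hbest t ht htx
        omega
    rcases Nat.eq_or_lt_of_le hmn with heq | hlt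
    · -- m = length: find? = none, A returns length = m
      have hnone : (List.range buttons.length).find? P = none := by
        rw [List.find?_eq_none]
        intro k hk
        rw [List.mem_range] at hk
        simp [hmin k (by omega)]
      simp [hnone, heq]
    · have : (List.range buttons.length).find? P = some m :=
        find?_range_first P buttons.length m hlt ((Pchar m).mpr ⟨s, hs, hl, hx⟩) hmin
      simp [this]
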